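-- pv_equiv track=rewrite | github.com/huang443765159/kai | example/9B-Find.py | search_100
-- ===== SOURCE A (Python) =====
-- def search_100(list_1, list_2, list_3):
--     bingo_list = list()
--     for num_1 in list_1:
--         for num_2 in list_2:
--             for num_3 in list_3:
--                 if num_1 + num_2 + num_3 == 100:
--                     bingo_list.append([num_1, num_2, num_3])
--     return bingo_list
-- ===== SOURCE B (Python) =====
-- def search_100(list_1, list_2, list_3):
--     counts = {}
--     for n in list_3:
--         counts[n] = counts.get(n, 0) + 1
--     bingo_list = []
--     for num_1 in list_1:
--         for num_2 in list_2:
--             need = 100 - num_1 - num_2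
--             bingo_list.extend([[num_1, num_2, need]] * counts.get(need, 0))
--     return bingo_list
-- ===== Notes on version B (the rewrite author's own statement) =====
-- stated objective: faster
-- what changed: Replaces the triple nested scan by a one-pass count dictionary over list_3 and, per (num_1,num_2) pair, appends count copies of the unique completing triple.
import Mathlib
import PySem

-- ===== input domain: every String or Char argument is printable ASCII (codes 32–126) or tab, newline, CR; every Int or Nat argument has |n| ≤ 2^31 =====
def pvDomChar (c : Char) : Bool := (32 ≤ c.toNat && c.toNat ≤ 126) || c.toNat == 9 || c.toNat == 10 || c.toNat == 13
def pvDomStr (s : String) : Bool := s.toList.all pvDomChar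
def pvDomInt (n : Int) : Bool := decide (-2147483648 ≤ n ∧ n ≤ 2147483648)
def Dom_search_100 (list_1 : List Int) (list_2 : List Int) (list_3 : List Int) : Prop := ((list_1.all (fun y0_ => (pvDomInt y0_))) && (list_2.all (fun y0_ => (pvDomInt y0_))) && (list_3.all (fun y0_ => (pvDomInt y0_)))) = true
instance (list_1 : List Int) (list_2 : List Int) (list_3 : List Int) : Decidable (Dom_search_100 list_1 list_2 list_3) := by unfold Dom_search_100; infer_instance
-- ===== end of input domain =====

-- ===== PORT A =====
def search_100 (list_1 : List Int) (list_2 : List Int) (list_3 : List Int) : List (List Int) :=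
  list_1.foldl (fun acc num_1 =>
    list_2.foldl (fun acc num_2 =>
      list_3.foldl (fun acc num_3 =>
        if num_1 + num_2 + num_3 == 100 then acc ++ [[num_1, num_2, num_3]] else acc) acc) acc) []

-- ===== PORT B =====
-- B: count list_3 once into a dict; per (num_1,num_2) append count copies of the unique completing triple (asymptotically faster).
def search_100_alt (list_1 : List Int) (list_2 : List Int) (list_3 : List Int) : List (List Int) :=
  let counts := list_3.foldl (fun d n => d.insert n (d.getD n 0 + 1)) PySem.Dict.empty
  list_1.foldl (fun acc num_1 =>
    list_2.foldl (fun acc num_2 =>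
      let need := 100 - num_1 - num_2
      acc ++ PySem.List.pyRepeat [[num_1, num_2, need]] (counts.getD need 0)) acc) []

-- ===== PRECONDITION & SPEC =====
def Spec_search_100 (list_1 : List Int) (list_2 : List Int) (list_3 : List Int) (out : List (List Int)) : Prop := out = search_100_alt list_1 list_2 list_3
instance (list_1 : List Int) (list_2 : List Int) (list_3 : List Int) (out : List (List Int)) : Decidable (Spec_search_100 list_1 list_2 list_3 out) := by unfold Spec_search_100; infer_instance

-- ===== CLAIM (what is proved, stated in full; the proofs are below) =====
def Claim_equal_search_100 : Prop := ∀ (list_1 : List Int) (list_2 : List Int) (list_3 : List Int), Dom_search_100 list_1 list_2 list_3 → Spec_search_100 list_1 list_2 list_3 (search_100 list_1 list_2 list_3)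

-- ===== LEMMAS AND PROOFS =====

-- ===== VERDICT (by name: the statement is the Claim_ definition above) =====
lemma inner_loop_eq (num_1 num_2 : Int) (list_3 : List Int) (acc : List (List Int)) :
    list_3.foldl (fun acc num_3 =>
        if num_1 + num_2 + num_3 == 100 then acc ++ [[num_1, num_2, num_3]] else acc) acc
      = acc ++ List.replicate (list_3.count (100 - num_1 - num_2)) [num_1, num_2, 100 - num_1 - num_2] := by
  induction list_3 generalizing acc with
  | nil => simp
  | cons x xs ih =>
    simp only [List.foldl_cons, List.count_cons, ih]
    by_cases h : num_1 + num_2 + x = 100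
    · have hx : x = 100 - num_1 - num_2 := by omega
      subst hx
      simp [h, List.replicate_succ]
    · have hx : ¬ (x = 100 - num_1 - num_2) := by omega
      simp [h, hx]

theorem search_100_spec : Claim_equal_search_100 := by
  intro list_1 list_2 list_3 _
  unfold Spec_search_100 search_100 search_100_alt
  have hcount : ∀ v : Int,
      (list_3.foldl (fun d n => d.insert n (d.getD n 0 + 1)) PySem.Dict.empty).getD v 0
        = (list_3.count v : Int) := by
    intro v
    rw [PySem.Dict.getD_foldl_insert_add_one]
    simp
  simp only []
  congr 1
  funext acc num_1
  congr 1
  funext acc num_2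
  rw [inner_loop_eq, hcount, PySem.List.pyRepeat_singleton, Int.toNat_natCast]
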